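-- pv_equiv track=rewrite | github.com/golibabduxalilov1/jalyuzBot | handlers/admin_section_status.py | get_last_sheet_date
-- ===== SOURCE A (Python) =====
-- from typing import Dict, List, Optional
--
-- def get_last_sheet_date(records: List[Dict]) -> str:
--     """Extract last date from sheet records"""
--     if not records:
--         return "topilmadi"
--
--     dates = []
--     for record in records:
--         date_str = record.get("date") or record.get("sana", "")
--         if date_str and date_str.strip():
--             dates.append(date_str.strip())
--
--     if not dates:
--         return "topilmadi"
--
--     # Return the last non-empty date (assuming data is ordered)
--     return dates[-1] if dates else "topilmadi"
-- ===== SOURCE B (Python) =====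
-- def get_last_sheet_date(records):
--     """Extract last date from sheet records"""
--     for record in reversed(records):
--         date_str = record.get("date") or record.get("sana", "")
--         if date_str and date_str.strip():
--             return date_str.strip()
--     return "topilmadi"
-- ===== Notes on version B (the rewrite author's own statement) =====
-- stated objective: simpler
-- what changed: Replaces the accumulate-all-valid-dates-then-take-last strategy with a single early-exit reverse scan that returns the first usable date from the end and needs no intermediate list or emptiness checks.
import Mathlib
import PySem

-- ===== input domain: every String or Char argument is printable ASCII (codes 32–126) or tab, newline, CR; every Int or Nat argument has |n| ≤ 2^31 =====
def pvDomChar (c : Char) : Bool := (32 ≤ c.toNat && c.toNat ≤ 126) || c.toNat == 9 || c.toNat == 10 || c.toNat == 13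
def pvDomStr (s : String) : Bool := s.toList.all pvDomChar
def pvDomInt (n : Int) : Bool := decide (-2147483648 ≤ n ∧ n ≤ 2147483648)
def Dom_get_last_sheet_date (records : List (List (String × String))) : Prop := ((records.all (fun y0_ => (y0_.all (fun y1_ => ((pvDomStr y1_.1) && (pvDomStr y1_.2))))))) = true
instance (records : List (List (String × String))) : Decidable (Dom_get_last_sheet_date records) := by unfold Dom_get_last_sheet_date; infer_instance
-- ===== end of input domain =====

-- B replaces A's accumulate-then-take-last list with a single early-exit reverse scan (objective: simpler).


-- ===== PORT A =====
-- record.get("date") or record.get("sana", "")  (Python 'or': falls through when the first value is missing or "")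
def pvDateStr (record : List (String × String)) : String :=
  match (PySem.Dict.mk record).get? "date" with
  | some s => if s ≠ "" then s else (PySem.Dict.mk record).getD "sana" ""
  | none => (PySem.Dict.mk record).getD "sana" ""

def get_last_sheet_date (records : List (List (String × String))) : String :=
  if records = [] then "topilmadi"
  else
    let dates := records.foldl (fun acc record =>
      let date_str := pvDateStr record
      if date_str ≠ "" ∧ PySem.Str.strip date_str ≠ "" then acc ++ [PySem.Str.strip date_str]
      else acc) []
    if dates = [] then "topilmadi"
    else ((PySem.List.pyGet? dates (-1)).getD "topilmadi")

-- ===== PORT B =====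
def pvAltGo : List (List (String × String)) → String
  | [] => "topilmadi"
  | record :: rest =>
    let date_str := pvDateStr record
    if date_str ≠ "" ∧ PySem.Str.strip date_str ≠ "" then PySem.Str.strip date_str
    else pvAltGo rest

def get_last_sheet_date_alt (records : List (List (String × String))) : String :=
  pvAltGo records.reverse

-- ===== PRECONDITION & SPEC =====
def Spec_get_last_sheet_date (records : List (List (String × String))) (out : String) : Prop := out = get_last_sheet_date_alt records
instance (records : List (List (String × String))) (out : String) : Decidable (Spec_get_last_sheet_date records out) := by unfold Spec_get_last_sheet_date; infer_instance

-- ===== CLAIM (what is proved, stated in full; the proofs are below) =====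
def Claim_equal_get_last_sheet_date : Prop := ∀ (records : List (List (String × String))), Dom_get_last_sheet_date records → Spec_get_last_sheet_date records (get_last_sheet_date records)

-- ===== LEMMAS AND PROOFS =====
-- the Option-valued extraction both proofs are phrased with
def pvVal (record : List (String × String)) : Option String :=
  let d := pvDateStr record
  if d ≠ "" ∧ PySem.Str.strip d ≠ "" then some (PySem.Str.strip d) else none

theorem pvVal_pos (r : List (String × String)) (h : pvDateStr r ≠ "" ∧ PySem.Str.strip (pvDateStr r) ≠ "") :
    pvVal r = some (PySem.Str.strip (pvDateStr r)) := by
  unfold pvVal; rw [if_pos h]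

theorem pvVal_neg (r : List (String × String)) (h : ¬ (pvDateStr r ≠ "" ∧ PySem.Str.strip (pvDateStr r) ≠ "")) :
    pvVal r = none := by
  unfold pvVal; rw [if_neg h]

theorem pv_foldl_eq_filterMap (l : List (List (String × String))) (acc : List String) :
    l.foldl (fun acc record =>
      let date_str := pvDateStr record
      if date_str ≠ "" ∧ PySem.Str.strip date_str ≠ "" then acc ++ [PySem.Str.strip date_str]
      else acc) acc = acc ++ l.filterMap pvVal := by
  induction l generalizing acc with
  | nil => simp
  | cons r rest ih =>
    by_cases h : pvDateStr r ≠ "" ∧ PySem.Str.strip (pvDateStr r) ≠ ""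
    · simp only [List.foldl_cons, List.filterMap_cons, pvVal_pos r h, if_pos h, ih]
      simp
    · simp only [List.foldl_cons, List.filterMap_cons, pvVal_neg r h, if_neg h, ih]

theorem pv_altGo_eq_headD (l : List (List (String × String))) :
    pvAltGo l = (l.filterMap pvVal).headD "topilmadi" := by
  induction l with
  | nil => rfl
  | cons r rest ih =>
    by_cases h : pvDateStr r ≠ "" ∧ PySem.Str.strip (pvDateStr r) ≠ ""
    · simp only [pvAltGo, List.filterMap_cons, pvVal_pos r h, if_pos h, List.headD_cons]
    · simp only [pvAltGo, List.filterMap_cons, pvVal_neg r h, if_neg h, ih]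

-- ===== VERDICT (by name: the statement is the Claim_ definition above) =====
theorem get_last_sheet_date_spec : Claim_equal_get_last_sheet_date := by
  intro records _
  show get_last_sheet_date records = get_last_sheet_date_alt records
  unfold get_last_sheet_date get_last_sheet_date_alt
  rw [pv_altGo_eq_headD, List.filterMap_reverse, pv_foldl_eq_filterMap, List.nil_append]
  by_cases hr : records = []
  · subst hr; simp
  · by_cases hd : records.filterMap pvVal = [] <;>
      simp [hr, hd, PySem.List.pyGet?_neg_one, List.headD_eq_head?_getD, List.head?_reverse]
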